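-- pv_equiv track=rewrite | github.com/donkarlo/mrs-self-awareness | selfaware-drones/pgm/dag/dbn/tstbn/mjpf/MJPF_MR.py | FindGraphStructure
-- ===== SOURCE A (Python) =====
-- def FindGraphStructure (idx, offset):
--
--     # Number of clusters
--     N = int(max(idx)+1)
--
--     # Length of the data
--     data_length =  len(idx)
--
--     # Create the index list: it just gives a correspondence key-index
--     index = dict()
--     for i in range (0, N):
--         index[i] = i
--
--     # list with all the interactions from a node i to a node j, with i != j
--     interactions = []
--     for i in range (0, data_length - offset):
--         # If we have a movement from a cluster to another one
--         #if idx[i + 1] != idx[i]: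
--         # Add the interaction to the list
--         pair = [idx[i + offset], idx[i]]
--         interactions.append(pair)
--     # Sort the list in ascending order of numbers
--     interactions.sort()
--
--     return index, interactions
-- ===== SOURCE B (Python) =====
-- def _index_map(N):
--     # key-index correspondence
--     return {i: i for i in range(N)}
--
--
-- def _transition_counts(idx, offset):
--     # count each transition pair (idx[i+offset], idx[i]) once
--     counts = {}
--     for pair in zip(idx[offset:], idx):
--         counts[pair] = counts.get(pair, 0) + 1
--     return counts
--
--
-- def _emit_sorted(counts):
--     # emit the pairs in ascending order directly from the sorted distinct keys
--     interactions = []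
--     for key in sorted(counts):
--         interactions.extend([key[0], key[1]] for _ in range(counts[key]))
--     return interactions
--
--
-- def FindGraphStructure(idx, offset):
--     N = int(max(idx) + 1)
--     return _index_map(N), _emit_sorted(_transition_counts(idx, offset))
-- ===== Notes on version B (the rewrite author's own statement) =====
-- stated objective: alternative
-- what changed: B replaces A's gather-all-pairs-then-sort with three staged helpers: a hash counter over zip(idx[offset:], idx), then emission of the interactions in order by expanding the sorted distinct keys with their multiplicities; the index dict is a comprehension instead of A's loop.
-- outside the precondition, e.g. on FindGraphStructure([], 0): A raises ValueError, B raises ValueError; on FindGraphStructure([1, 0, 2], -1): A raises IndexError, B returns ({0: 0, 1: 1, 2: 2}, [[2, 1]])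
import Mathlib
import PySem

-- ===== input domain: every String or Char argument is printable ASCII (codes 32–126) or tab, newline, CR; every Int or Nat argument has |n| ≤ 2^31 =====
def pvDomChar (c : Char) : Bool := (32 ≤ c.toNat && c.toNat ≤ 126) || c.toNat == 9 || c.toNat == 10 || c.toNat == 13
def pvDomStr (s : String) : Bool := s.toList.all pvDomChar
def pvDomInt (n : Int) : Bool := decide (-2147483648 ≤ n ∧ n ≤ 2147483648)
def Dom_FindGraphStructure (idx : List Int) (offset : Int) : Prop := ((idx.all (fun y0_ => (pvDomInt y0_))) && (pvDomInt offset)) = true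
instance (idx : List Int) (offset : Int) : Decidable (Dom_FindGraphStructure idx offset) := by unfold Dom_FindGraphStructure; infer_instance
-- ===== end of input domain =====

-- B replaces A's gather-all-pairs-then-sort with three staged helpers — a comprehension for the
-- index dict, a hash counter of the zipped transition pairs, and an in-order emission that expands
-- the sorted distinct keys by their multiplicities (objective: alternative).

-- ===== PORT A =====
-- max(idx) raises ValueError on [] and idx[...] raises IndexError for offset < 0: both excluded by Pre_,
-- so the .getD 0 defaults below are never reached on admitted inputs.
def FindGraphStructure (idx : List Int) (offset : Int) : (List (Int × Int)) × List (List Int) :=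
  let N : Int := (PySem.List.max? idx (fun y => y)).getD 0 + 1
  let dataLength : Int := idx.length
  let index : PySem.Dict Int Int :=
    (PySem.List.pyRange 0 N).foldl (fun d i => d.insert i i) PySem.Dict.empty
  let interactions : List (List Int) :=
    (PySem.List.pyRange 0 (dataLength - offset)).foldl
      (fun acc i => acc ++ [[PySem.List.pyGetD idx (i + offset) 0, PySem.List.pyGetD idx i 0]]) []
  (index.items, PySem.List.sorted interactions (fun x => x))

-- ===== PORT B =====
-- {i: i for i in range(N)}: the keys are distinct, so as an insertion-ordered association list
-- the comprehension IS this pair list (exact).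
def pvIndexMap (N : Int) : List (Int × Int) :=
  (PySem.List.pyRange 0 N).map (fun i => (i, i))

def pvTransitionCounts (idx : List Int) (offset : Int) : PySem.Dict (Int × Int) Int :=
  ((PySem.List.slice idx (some offset) none).zip idx).foldl
    (fun counts pair => counts.modify pair 0 (· + 1)) PySem.Dict.empty

def pvEmitSorted (counts : PySem.Dict (Int × Int) Int) : List (List Int) :=
  (PySem.List.sorted2 counts.keys Prod.fst Prod.snd).foldl
    (fun interactions key =>
      interactions ++ List.replicate (counts.getD key 0).toNat [key.1, key.2]) []

def FindGraphStructure_alt (idx : List Int) (offset : Int) : (List (Int × Int)) × List (List Int) :=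
  let N : Int := (PySem.List.max? idx (fun y => y)).getD 0 + 1
  (pvIndexMap N, pvEmitSorted (pvTransitionCounts idx offset))

-- ===== PRECONDITION & SPEC =====
-- Pre_ excludes exactly the inputs where the Python A raises: max([]) is a ValueError,
-- and a negative offset always runs idx[i] past the end (IndexError).
def Pre_FindGraphStructure (idx : List Int) (offset : Int) : Prop := idx ≠ [] ∧ 0 ≤ offset
instance (idx : List Int) (offset : Int) : Decidable (Pre_FindGraphStructure idx offset) := by unfold Pre_FindGraphStructure; infer_instance
def pvWitness_FindGraphStructure : List Int × Int := ([0, 1, 0, 2], 1)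
def Spec_FindGraphStructure (idx : List Int) (offset : Int) (out : (List (Int × Int)) × List (List Int)) : Prop := out = FindGraphStructure_alt idx offset
instance (idx : List Int) (offset : Int) (out : (List (Int × Int)) × List (List Int)) : Decidable (Spec_FindGraphStructure idx offset out) := by unfold Spec_FindGraphStructure; infer_instance

-- ===== CLAIM (what is proved, stated in full; the proofs are below) =====
def Claim_equal_FindGraphStructure : Prop := ∀ (idx : List Int) (offset : Int), Dom_FindGraphStructure idx offset → Pre_FindGraphStructure idx offset → Spec_FindGraphStructure idx offset (FindGraphStructure idx offset)

-- ===== LEMMAS AND PROOFS =====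

-- the key [a, b] that A's pair lists realise
def pvToL (p : Int × Int) : List Int := [p.1, p.2]

-- A's index-building loop over the fresh distinct keys of range(N) appends exactly B's pair list
lemma pv_index_eq (N : Int) :
    ((PySem.List.pyRange 0 N).foldl (fun d i => d.insert i i) PySem.Dict.empty).items
      = pvIndexMap N := by
  have h := PySem.Dict.items_foldl_insert_fresh (d := (PySem.Dict.empty : PySem.Dict Int Int))
    (l := PySem.List.pyRange 0 N) (k := fun i => i) (v := fun i => i)
    (by intro a _; exact PySem.Dict.contains_empty a)
    (by simpa using PySem.List.nodup_pyRange_one 0 N)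
  simpa [pvIndexMap] using h

-- core's List.lt and Mathlib's lexicographic linear order on List Int are the same relation
lemma pv_listInt_lt_iff (a b : List Int) :
    (@LT.lt _ List.instLT a b) ↔ (@LT.lt _ (List.instLinearOrder (α := Int)).toLT a b) :=
  ⟨(List.lt_iff_lex_lt a b).mp, (List.lt_iff_lex_lt a b).mpr⟩

-- Python's sort result does not depend on which (propositionally equal) order instance the port elaborated
lemma pv_sorted_lt_congr {α κ : Type} (i1 i2 : LT κ) (d1 : @DecidableLT κ i1) (d2 : @DecidableLT κ i2)
    (h : ∀ a b : κ, (@LT.lt κ i1 a b ↔ @LT.lt κ i2 a b)) (xs : List α) (key : α → κ) :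
    @PySem.List.sorted α κ i1 d1 xs key false = @PySem.List.sorted α κ i2 d2 xs key false := by
  unfold PySem.List.sorted
  simp only [Bool.false_eq_true, if_false]
  have hb : (fun a b : α => @decide _ (d1 (key a) (key b))) = (fun a b => @decide _ (d2 (key a) (key b))) :=
    funext fun a => funext fun b => decide_eq_decide.mpr (h (key a) (key b))
  exact congrArg (fun f => xs.foldl (fun acc x => PySem.List.insertBy f x acc) []) hb

-- sorting pairs by their tuple order = sorting them by the key [p.1, p.2] (Python's lexicographic tuple/list order agree)
lemma pv_sorted2_eq_sorted_listkey (xs : List (Int × Int)) :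
    PySem.List.sorted2 xs Prod.fst Prod.snd =
      PySem.List.sorted (κ := List Int) xs (fun p => [p.1, p.2]) := by
  unfold PySem.List.sorted2 PySem.List.sorted
  simp only [Bool.false_eq_true, if_false]
  have hb : (fun a b : Int × Int => (decide (a.1 < b.1) || (!decide (b.1 < a.1) && decide (a.2 < b.2))))
      = (fun a b : Int × Int => decide (([a.1, a.2] : List Int) < [b.1, b.2])) := by
    funext a b
    rw [Bool.eq_iff_iff]
    simp [List.cons_lt_cons_iff]
    omega
  exact congrArg (fun f => xs.foldl (fun acc x => PySem.List.insertBy f x acc) []) hb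

-- the index-loop pairs ARE zip(idx[offset:], idx)  (0 ≤ offset)
lemma pv_pairs_eq (idx : List Int) (offset : Int) (h : 0 ≤ offset) :
    (PySem.List.pyRange 0 ((idx.length : Int) - offset)).map
        (fun i => [PySem.List.pyGetD idx (i + offset) 0, PySem.List.pyGetD idx i 0]) =
      ((PySem.List.slice idx (some offset) none).zip idx).map pvToL := by
  obtain ⟨k, rfl⟩ := Int.eq_ofNat_of_zero_le h
  rw [PySem.List.slice_from idx h, Int.toNat_natCast]
  by_cases hk : idx.length ≤ k
  · have h2 : PySem.List.pyRange 0 ((idx.length : Int) - (k : Int)) = [] := by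
      simp [PySem.List.pyRange]
      omega
    rw [h2, List.drop_eq_nil_of_le hk]
    simp
  · have hLk : (idx.length : Int) - (k : Int) = ((idx.length - k : Nat) : Int) := by omega
    rw [hLk, PySem.List.pyRange_zero_natCast, List.map_map]
    apply List.ext_getElem
    · simp [List.length_zip]
    · intro j hj1 hj2
      simp only [List.getElem_map, List.getElem_range, Function.comp_apply, List.getElem_zip,
        List.getElem_drop, pvToL]
      have hjk : j < idx.length - k := by simpa using hj1
      have e1 : ((j : Int) + (k : Int)) = ((j + k : Nat) : Int) := by push_cast; ring
      rw [e1, PySem.List.pyGetD_natCast, PySem.List.pyGetD_natCast]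
      have hb1 : j + k < idx.length := by omega
      have hb2 : j < idx.length := by omega
      rw [List.getD_eq_getElem idx 0 hb1, List.getD_eq_getElem idx 0 hb2]
      simp [Nat.add_comm]

lemma pv_count_flatMap (l : List (Int × Int)) :
    ∀ (ks : List (Int × Int)), ks.Nodup → ∀ x,
      (ks.flatMap fun k => List.replicate (l.count k) k).count x
        = if x ∈ ks then l.count x else 0 := by
  intro ks
  induction ks with
  | nil => intro _ x; simp
  | cons k ks ih =>
    intro hnd x
    rw [List.flatMap_cons, List.count_append, ih hnd.of_cons x, List.count_replicate]
    by_cases hxk : x = k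
    · subst hxk
      have : x ∉ ks := (List.nodup_cons.mp hnd).1
      simp [this]
    · simp [List.mem_cons, hxk, Ne.symm hxk, beq_iff_eq]

-- count-expansion over nodup keys covering l is a permutation of l
lemma pv_flatMap_replicate_count (l ks : List (Int × Int)) (hnd : ks.Nodup)
    (hm : ∀ x, x ∈ ks ↔ x ∈ l) :
    (ks.flatMap fun k => List.replicate (l.count k) k).Perm l := by
  rw [List.perm_iff_count]
  intro x
  rw [pv_count_flatMap l ks hnd x]
  by_cases hx : x ∈ ks
  · simp [hx]
  · have : x ∉ l := fun hc => hx ((hm x).mpr hc)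
    simp [hx, List.count_eq_zero_of_not_mem this]

-- expansion of keys whose [a, b] views are in order is sorted
lemma pv_pairwise_flatMap_replicate (ks : List (Int × Int)) (c : Int × Int → Nat)
    (h : ks.Pairwise fun a b => pvToL a ≤ pvToL b) :
    (ks.flatMap fun k => List.replicate (c k) (pvToL k)).Pairwise (fun x y : List Int => x ≤ y) := by
  induction ks with
  | nil => simp
  | cons k ks ih =>
    rw [List.flatMap_cons, List.pairwise_append]
    refine ⟨?_, ih h.of_cons, ?_⟩
    · exact List.pairwise_replicate.mpr (Or.inr le_rfl)
    · intro a ha b hb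
      obtain rfl := List.eq_of_mem_replicate ha
      obtain ⟨k', hk', hb'⟩ := List.mem_flatMap.mp hb
      obtain rfl := List.eq_of_mem_replicate hb'
      exact List.rel_of_pairwise_cons h hk'

-- ===== VERDICT (by name: the statement is the Claim_ definition above) =====
theorem FindGraphStructure_spec : Claim_equal_FindGraphStructure := by
  intro idx offset _ hpre
  unfold Spec_FindGraphStructure FindGraphStructure FindGraphStructure_alt pvEmitSorted pvTransitionCounts
  simp only [Prod.mk.injEq]
  refine ⟨pv_index_eq _, ?_⟩
  -- name the shared pair list
  set pairs : List (Int × Int) := (PySem.List.slice idx (some offset) none).zip idx with hpairs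
  -- B's counting loop is collections.Counter of the pairs
  rw [← PySem.Dict.counter_eq_foldl pairs]
  -- A's appending loop is a map over the index range, which is exactly pairs (0 ≤ offset)
  rw [PySem.List.foldl_append_singleton_eq_map
        (fun i => [PySem.List.pyGetD idx (i + offset) 0, PySem.List.pyGetD idx i 0]),
      List.nil_append, pv_pairs_eq idx offset hpre.2]
  -- B's emission loop is a flatMap of replicated sorted keys
  rw [PySem.List.foldl_append_eq_flatMap
        (fun p : Int × Int => List.replicate ((PySem.Dict.counter pairs).getD p 0).toNat [p.1, p.2]),
      List.nil_append, PySem.Dict.keys_counter pairs, pv_sorted2_eq_sorted_listkey]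
  set sks := PySem.List.sorted (κ := List Int) (PySem.Set.ofList pairs) (fun p => [p.1, p.2]) with hsks
  have hskperm : sks.Perm (PySem.Set.ofList pairs) := PySem.List.sorted_perm _ _ _
  have hnd : sks.Nodup := hskperm.nodup_iff.mpr (PySem.Set.nodup_ofList pairs)
  have hmem : ∀ x, x ∈ sks ↔ x ∈ pairs :=
    fun x => (hskperm.mem_iff).trans (PySem.Set.mem_ofList pairs x)
  have hflat : (sks.flatMap fun p => List.replicate ((PySem.Dict.counter pairs).getD p 0).toNat [p.1, p.2])
      = sks.flatMap fun p => List.replicate (pairs.count p) (pvToL p) := by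
    have hf : (fun p : Int × Int => List.replicate ((PySem.Dict.counter pairs).getD p 0).toNat [p.1, p.2])
        = fun p => List.replicate (pairs.count p) (pvToL p) := by
      funext p
      rw [PySem.Dict.getD_counter, Int.toNat_natCast]
      rfl
    rw [hf]
  rw [hflat]
  have hbr1 := pv_sorted_lt_congr (α := Int × Int) List.instLT (List.instLinearOrder (α := Int)).toLT
      (fun a b : List Int => List.decidableLT a b) LinearOrder.toDecidableLT pv_listInt_lt_iff
      (PySem.Set.ofList pairs) (fun p => [p.1, p.2])
  have hbr2 := pv_sorted_lt_congr (α := List Int) List.instLT (List.instLinearOrder (α := Int)).toLT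
      (fun a b : List Int => List.decidableLT a b) LinearOrder.toDecidableLT pv_listInt_lt_iff
      (pairs.map pvToL) (fun x => x)
  -- the sorted keys are in order under the [a, b] view
  have hle : sks.Pairwise fun a b => pvToL a ≤ pvToL b := by
    rw [hsks, hbr1]
    simpa [pvToL] using
      PySem.List.sorted_pairwise (PySem.Set.ofList pairs) (fun p : Int × Int => ([p.1, p.2] : List Int))
  have hpw := pv_pairwise_flatMap_replicate sks (fun p => pairs.count p) hle
  have hperm : (sks.flatMap fun p => List.replicate (pairs.count p) (pvToL p)).Perm (pairs.map pvToL) := by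
    have h1 := (pv_flatMap_replicate_count pairs sks hnd hmem).map pvToL
    rw [List.map_flatMap] at h1
    simpa [List.map_replicate] using h1
  rw [hbr2]
  exact PySem.List.sorted_id_eq_of_perm_of_pairwise (pairs.map pvToL) _ hperm hpw
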